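-- pv_equiv track=rewrite | github.com/mateuslippstein/python | beecrowd/1248.py | check_diet
-- ===== SOURCE A (Python) =====
-- def check_diet(diet, breakfast, lunch):
--     if not diet and not breakfast and not lunch:
--         return ""
--
--     remaining_food = []  # List to store characters remaining in the diet after meals
--     extra_food = []  # List to store characters eaten in excess or not present in the diet
--     diet = set(diet)
--
--     for char in diet:
--         if char in breakfast:
--             breakfast = breakfast.replace(char, '', 1)  # Remove character from breakfast once eaten
--         elif char in lunch:
--             lunch = lunch.replace(char, '', 1)  # Remove character from lunch once eaten
--         else:
--             remaining_food.append(char)  # Character not eaten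
--
--     extra_food = list(breakfast + lunch)  # Combine remaining breakfast and lunch as extra_chars
--
--     if extra_food:
--         return "CHEATER"  # If there are extra_chars, it means the diet was violated
--     else:
--         return ''.join(sorted(remaining_food))
-- ===== SOURCE B (Python) =====
-- def check_diet(diet, breakfast, lunch):
--     D = set(diet)
--     eaten_b = {c for c in D if c in breakfast}
--     eaten_l = {c for c in D if c not in breakfast and c in lunch}
--     if len(breakfast) > len(eaten_b) or len(lunch) > len(eaten_l):
--         return "CHEATER"
--     return ''.join(sorted(c for c in D if c not in breakfast and c not in lunch))
-- ===== Notes on version B (the rewrite author's own statement) =====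
-- stated objective: simpler
-- what changed: Replaces A's destructive loop (repeatedly mutating breakfast/lunch with replace(ch,'',1) and collecting leftovers) by set comprehensions plus length arithmetic: leftovers exist iff len(meal) exceeds the number of distinct diet chars it contains.
import Mathlib
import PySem

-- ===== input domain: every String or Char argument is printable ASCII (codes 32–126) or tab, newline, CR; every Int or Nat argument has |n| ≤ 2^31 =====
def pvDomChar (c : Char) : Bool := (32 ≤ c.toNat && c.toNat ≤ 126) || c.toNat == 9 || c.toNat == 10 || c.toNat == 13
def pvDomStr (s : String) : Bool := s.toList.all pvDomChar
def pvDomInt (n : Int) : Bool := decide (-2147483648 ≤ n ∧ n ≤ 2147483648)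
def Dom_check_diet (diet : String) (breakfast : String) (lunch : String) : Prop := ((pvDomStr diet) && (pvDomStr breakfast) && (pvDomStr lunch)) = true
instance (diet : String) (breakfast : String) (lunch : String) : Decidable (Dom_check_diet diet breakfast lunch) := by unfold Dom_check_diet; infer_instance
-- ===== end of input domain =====

-- B replaces A's destructive removal loop by set comprehensions and length arithmetic (objective: simpler).

-- ===== PORT A =====
-- A's loop over the diet set, carrying (breakfast, lunch, remaining_food).
-- 'char in breakfast' for a single char is char membership; breakfast.replace(char,'',1)
-- removes the first occurrence of that char, which is List.erase — both exact here.
def checkDietLoop : List Char → List Char → List Char → List Char → List Char × List Char × List Char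
  | [], b, l, rem => (b, l, rem)
  | c :: ds, b, l, rem =>
    if c ∈ b then checkDietLoop ds (b.erase c) l rem
    else if c ∈ l then checkDietLoop ds b (l.erase c) rem
    else checkDietLoop ds b l (rem ++ [c])

def check_diet (diet : String) (breakfast : String) (lunch : String) : String :=
  let dl := diet.toList
  let bl := breakfast.toList
  let ll := lunch.toList
  if dl = [] ∧ bl = [] ∧ ll = [] then "" else
  let st := checkDietLoop (PySem.Set.ofList dl) bl ll []
  let extra := st.1 ++ st.2.1
  -- Python iterates set(diet) in unspecified order; the result is order-independent
  -- (rem is sorted before joining, CHEATER depends only on leftover lengths), so the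
  -- insertion-order list PySem.Set.ofList is a faithful choice.
  if extra ≠ [] then "CHEATER"
  else String.ofList (PySem.List.sorted st.2.2 (fun x => x) false)   -- ''.join(sorted(remaining_food))

-- ===== PORT B =====
def check_diet_alt (diet : String) (breakfast : String) (lunch : String) : String :=
  let D : PySem.Set Char := PySem.Set.ofList diet.toList
  let bl := breakfast.toList
  let ll := lunch.toList
  -- set comprehensions over the (nodup) set D: filters, still nodup
  let eaten_b := D.filter (fun c => bl.contains c)
  let eaten_l := D.filter (fun c => !(bl.contains c) && ll.contains c)
  if bl.length > eaten_b.length ∨ ll.length > eaten_l.length then "CHEATER"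
  else String.ofList (PySem.List.sorted (D.filter (fun c => !(bl.contains c) && !(ll.contains c))) (fun x => x) false)

-- ===== PRECONDITION & SPEC =====
def Spec_check_diet (diet : String) (breakfast : String) (lunch : String) (out : String) : Prop := out = check_diet_alt diet breakfast lunch
instance (diet : String) (breakfast : String) (lunch : String) (out : String) : Decidable (Spec_check_diet diet breakfast lunch out) := by unfold Spec_check_diet; infer_instance

-- ===== CLAIM (what is proved, stated in full; the proofs are below) =====
def Claim_equal_check_diet : Prop := ∀ (diet : String) (breakfast : String) (lunch : String), Dom_check_diet diet breakfast lunch → Spec_check_diet diet breakfast lunch (check_diet diet breakfast lunch)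

-- ===== LEMMAS AND PROOFS =====

-- Characterisation of A's loop on a duplicate-free diet list: each component in closed form.
theorem checkDietLoop_spec (ds : List Char) : ∀ (b l rem : List Char), ds.Nodup →
    checkDietLoop ds b l rem =
      ((ds.filter (fun c => b.contains c)).foldl List.erase b,
       (ds.filter (fun c => !(b.contains c) && l.contains c)).foldl List.erase l,
       rem ++ ds.filter (fun c => !(b.contains c) && !(l.contains c))) := by
  induction ds with
  | nil => intro b l rem _; simp [checkDietLoop]
  | cons c ds ih =>
    intro b l rem hnd
    have hc : c ∉ ds := (List.nodup_cons.mp hnd).1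
    have hnd' : ds.Nodup := (List.nodup_cons.mp hnd).2
    by_cases hb : c ∈ b
    · have h1 : ds.filter (fun x => (b.erase c).contains x) = ds.filter (fun x => b.contains x) := by
        apply List.filter_congr
        intro x hx
        have hne : x ≠ c := fun h => hc (h ▸ hx)
        simp [List.mem_erase_of_ne hne]
      have h2 : ds.filter (fun x => !((b.erase c).contains x) && l.contains x)
              = ds.filter (fun x => !(b.contains x) && l.contains x) := by
        apply List.filter_congr
        intro x hx
        have hne : x ≠ c := fun h => hc (h ▸ hx)
        simp [List.mem_erase_of_ne hne]
      have h3 : ds.filter (fun x => !((b.erase c).contains x) && !(l.contains x))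
              = ds.filter (fun x => !(b.contains x) && !(l.contains x)) := by
        apply List.filter_congr
        intro x hx
        have hne : x ≠ c := fun h => hc (h ▸ hx)
        simp [List.mem_erase_of_ne hne]
      simp only [checkDietLoop, if_pos hb, ih (b.erase c) l rem hnd', h1, h2, h3,
        List.filter_cons]
      simp [hb]
    · by_cases hl : c ∈ l
      · have h2 : ds.filter (fun x => !(b.contains x) && (l.erase c).contains x)
                = ds.filter (fun x => !(b.contains x) && l.contains x) := by
          apply List.filter_congr
          intro x hx
          have hne : x ≠ c := fun h => hc (h ▸ hx)
          simp [List.mem_erase_of_ne hne]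
        have h3 : ds.filter (fun x => !(b.contains x) && !((l.erase c).contains x))
                = ds.filter (fun x => !(b.contains x) && !(l.contains x)) := by
          apply List.filter_congr
          intro x hx
          have hne : x ≠ c := fun h => hc (h ▸ hx)
          simp [List.mem_erase_of_ne hne]
        simp only [checkDietLoop, if_neg hb, if_pos hl, ih b (l.erase c) rem hnd', h2, h3,
          List.filter_cons]
        simp [hb, hl]
      · simp only [checkDietLoop, if_neg hb, if_neg hl, ih b l (rem ++ [c]) hnd',
          List.filter_cons]
        simp [hb, hl]

-- Erasing a duplicate-free list of members removes exactly one occurrence each.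
theorem length_foldl_erase (es : List Char) : ∀ (b : List Char), es.Nodup → (∀ e ∈ es, e ∈ b) →
    (es.foldl List.erase b).length + es.length = b.length := by
  induction es with
  | nil => intro b _ _; simp
  | cons e es ih =>
    intro b hnd hmem
    have he : e ∈ b := hmem e (by simp)
    have hnd' : es.Nodup := (List.nodup_cons.mp hnd).2
    have hes : ∀ x ∈ es, x ∈ b.erase e := by
      intro x hx
      have hne : x ≠ e := fun h => (List.nodup_cons.mp hnd).1 (h ▸ hx)
      exact (List.mem_erase_of_ne hne).mpr (hmem x (by simp [hx]))
    have := ih (b.erase e) hnd' hes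
    have hlen : (b.erase e).length = b.length - 1 := List.length_erase_of_mem he
    have hpos : 1 ≤ b.length := List.length_pos_of_mem he
    simp only [List.foldl_cons, List.length_cons]
    omega

theorem check_diet_eq (diet breakfast lunch : String) :
    check_diet diet breakfast lunch = check_diet_alt diet breakfast lunch := by
  unfold check_diet check_diet_alt
  dsimp only
  generalize diet.toList = dl
  generalize breakfast.toList = bl
  generalize lunch.toList = ll
  have hnd : (PySem.Set.ofList dl).Nodup := PySem.Set.nodup_ofList dl
  have hloop := checkDietLoop_spec (PySem.Set.ofList dl) bl ll [] hnd
  rw [hloop]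
  dsimp only
  by_cases hz : dl = [] ∧ bl = [] ∧ ll = []
  · rw [if_pos hz]
    obtain ⟨h1, h2, h3⟩ := hz
    subst h1 h2 h3
    decide
  · rw [if_neg hz, List.nil_append]
    have hebm : ∀ e ∈ (PySem.Set.ofList dl).filter (fun c => bl.contains c), e ∈ bl := by
      intro e he; have := List.of_mem_filter he; simpa using this
    have helm : ∀ e ∈ (PySem.Set.ofList dl).filter (fun c => !(bl.contains c) && ll.contains c),
        e ∈ ll := by
      intro e he; have := List.of_mem_filter he; simp at this; exact this.2
    have hlb := length_foldl_erase _ bl (hnd.filter _) hebm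
    have hll2 := length_foldl_erase _ ll (hnd.filter _) helm
    have hiff :
        (((PySem.Set.ofList dl).filter (fun c => bl.contains c)).foldl List.erase bl ++
           ((PySem.Set.ofList dl).filter (fun c => !(bl.contains c) && ll.contains c)).foldl List.erase ll ≠ []) ↔
        (bl.length > ((PySem.Set.ofList dl).filter (fun c => bl.contains c)).length ∨
           ll.length > ((PySem.Set.ofList dl).filter (fun c => !(bl.contains c) && ll.contains c)).length) := by
      rw [Ne, List.append_eq_nil_iff, ← List.length_eq_zero_iff, ← List.length_eq_zero_iff]
      omega
    exact if_congr hiff rfl rfl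

-- ===== VERDICT (by name: the statement is the Claim_ definition above) =====
theorem check_diet_spec : Claim_equal_check_diet := by
  intro diet breakfast lunch _
  exact check_diet_eq diet breakfast lunch
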